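-- pv_equiv track=rewrite | github.com/galug/2023-algorithm-study | level_4/auto_completion.py | solution
-- ===== SOURCE A (Python) =====
-- def insert(root: dict, word: str):
--     count = 1
--     for ch in word:
--         if ch not in root:
--             root[ch] = {}
--             root = root[ch]
--             root['count'] = count
--             root['has_words'] = 1
--             count += 1
--             continue
--         root = root[ch]
--         root['has_words'] += 1
--         count += 1
--
-- def search(root: dict, word: str):
--     for ch in word:
--         root = root[ch]
--         if root['has_words'] == 1:
--             return root['count']
--     return root['count']
--
-- def solution(words: list) -> int:
--     answer = 0
--     root = {}
--     root['count'] = 0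
--     root['has_words'] = 0
--     for word in words:
--         insert(root, word)
--     for word in words:
--         answer += search(root, word)
--     return answer
-- ===== SOURCE B (Python) =====
-- def solution(words: list) -> int:
--     total = 0
--     for i, w in enumerate(words):
--         best = 0
--         for j, v in enumerate(words):
--             if j != i:
--                 k = 0
--                 m = min(len(w), len(v))
--                 while k < m and w[k] == v[k]:
--                     k += 1
--                 if k > best:
--                     best = k
--         total += min(len(w), best + 1)
--     return total
-- ===== Notes on version B (the rewrite author's own statement) =====
-- stated objective: simpler
-- what changed: Replaces the mutable nested-dict trie (insert every word, then re-walk each word counting shared prefixes) by a direct pairwise computation: each word contributes min(len(word), 1 + max longest-common-prefix with any other word); no trie is built.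
import Mathlib
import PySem

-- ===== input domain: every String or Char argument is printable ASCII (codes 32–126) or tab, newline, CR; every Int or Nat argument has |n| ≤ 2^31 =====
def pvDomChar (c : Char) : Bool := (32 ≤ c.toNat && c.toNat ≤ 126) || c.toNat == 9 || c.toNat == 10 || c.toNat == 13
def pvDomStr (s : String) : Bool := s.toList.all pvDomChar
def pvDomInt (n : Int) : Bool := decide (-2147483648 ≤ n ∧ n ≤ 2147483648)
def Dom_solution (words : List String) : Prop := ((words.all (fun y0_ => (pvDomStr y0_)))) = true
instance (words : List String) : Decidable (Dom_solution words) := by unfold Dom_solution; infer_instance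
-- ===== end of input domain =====

-- B replaces A's nested-dict trie (insert all words, then re-walk each word) by a direct
-- pairwise computation: each word contributes min(len(word), 1 + max LCP with any other word);
-- objective: simpler (no trie structure at all).

-- ===== PORT A =====
-- The Python trie is a nested dict with Char keys plus the two Int fields 'count' and
-- 'has_words'; ported as a mutual inductive (count, has_words, children), children in
-- insertion order as Python dicts are.
mutual
inductive TNode : Type where
  | mk : Int → Int → TChildren → TNode
inductive TChildren : Type where
  | nil : TChildren
  | cons : Char → TNode → TChildren → TChildren
end

-- dict lookup / dict store (overwrite in place, else append), exact for Python dicts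
def childGet? : TChildren → Char → Option TNode
  | .nil, _ => none
  | .cons y n rest, x => if x = y then some n else childGet? rest x

def childSet : TChildren → Char → TNode → TChildren
  | .nil, x, n => .cons x n .nil
  | .cons y m rest, x, n => if x = y then .cons y n rest else .cons y m (childSet rest x n)

-- A's insert: the loop descending (and mutating) the trie becomes path-rebuilding recursion
def insertA : TNode → List Char → Int → TNode
  | n, [], _ => n
  | .mk c h ch, x :: xs, cnt =>
    match childGet? ch x with
    | none => .mk c h (childSet ch x (insertA (.mk cnt 1 .nil) xs (cnt + 1)))
    | some (.mk c2 h2 ch2) => .mk c h (childSet ch x (insertA (.mk c2 (h2 + 1) ch2) xs (cnt + 1)))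

-- A's search; on a missing child Python would raise KeyError, which solution never reaches
-- (every searched word was inserted first) — 0 stands in for that unreachable branch
def searchA : TNode → List Char → Int
  | .mk c _ _, [] => c
  | .mk _ _ ch, x :: xs =>
    match childGet? ch x with
    | none => 0
    | some (.mk c2 h2 ch2) => if h2 == 1 then c2 else searchA (.mk c2 h2 ch2) xs

def solution (words : List String) : Int :=
  let root := words.foldl (fun r w => insertA r w.toList 1) (.mk 0 0 .nil)
  words.foldl (fun a w => a + searchA root w.toList) 0

-- ===== PORT B =====
-- Source B's inner while loop computing the common-prefix length
def lcpB : List Char → List Char → Int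
  | a :: as, b :: bs => if a = b then 1 + lcpB as bs else 0
  | _, _ => 0

def solution_alt (words : List String) : Int :=
  (PySem.List.enumerate words).foldl (fun total iw =>
    let best := (PySem.List.enumerate words).foldl (fun best jv =>
      if jv.1 ≠ iw.1 then
        (let k := lcpB iw.2.toList jv.2.toList; if k > best then k else best)
      else best) 0
    total + min (PySem.Str.len iw.2) (best + 1)) 0

-- ===== PRECONDITION & SPEC =====
def Spec_solution (words : List String) (out : Int) : Prop := out = solution_alt words
instance (words : List String) (out : Int) : Decidable (Spec_solution words out) := by unfold Spec_solution; infer_instance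

-- ===== CLAIM (what is proved, stated in full; the proofs are below) =====
def Claim_equal_solution : Prop := ∀ (words : List String), Dom_solution words → Spec_solution words (solution words)

-- ===== LEMMAS AND PROOFS =====

-- children-level view of insertA
def insertC : TChildren → List Char → Int → TChildren
  | ch, [], _ => ch
  | ch, x :: xs, cnt =>
    match childGet? ch x with
    | none => childSet ch x (insertA (.mk cnt 1 .nil) xs (cnt + 1))
    | some (.mk c2 h2 ch2) => childSet ch x (insertA (.mk c2 (h2 + 1) ch2) xs (cnt + 1))

theorem insertA_mk (c h : Int) (ch : TChildren) (w : List Char) (d : Int) :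
    insertA (.mk c h ch) w d = .mk c h (insertC ch w d) := by
  cases w with
  | nil => rfl
  | cons x xs =>
    simp only [insertA, insertC]
    rcases hg : childGet? ch x with _ | ⟨c2, h2, ch2⟩ <;> simp

-- "insert into a child" = bump has_words, insert into its children
def updIns : TNode → List Char → Int → TNode
  | .mk c h ch, w, d => .mk c (h + 1) (insertC ch w d)

theorem insertC_cons (ch : TChildren) (x : Char) (xs : List Char) (d : Int) :
    insertC ch (x :: xs) d =
      childSet ch x (updIns ((childGet? ch x).getD (.mk d 0 .nil)) xs (d + 1)) := by
  simp only [insertC]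
  rcases hg : childGet? ch x with _ | ⟨c2, h2, ch2⟩ <;>
    simp [updIns, insertA_mk]

theorem childGet?_childSet :
    ∀ (c : TChildren) (y : Char) (n : TNode) (x : Char),
      childGet? (childSet c y n) x = if x = y then some n else childGet? c x
  | .nil, y, n, x => by simp [childSet, childGet?]
  | .cons z m rest, y, n, x => by
    simp only [childSet]
    by_cases hzy : y = z
    · subst hzy
      by_cases hxy : x = y <;> simp [childGet?, hxy]
    · simp only [if_neg hzy, childGet?]
      by_cases hxz : x = z
      · subst hxz
        have hxy : ¬ x = y := fun h => hzy h.symm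
        simp [hxy]
      · simp [hxz, childGet?_childSet rest y n x]

-- words of ws that begin with x, with that first character removed (in order)
def suffixes (ws : List (List Char)) (x : Char) : List (List Char) :=
  ws.filterMap (fun w => match w with
    | [] => none
    | y :: ys => if x = y then some ys else none)

theorem suffixes_nil (x : Char) : suffixes [] x = [] := rfl

theorem suffixes_cons (v : List Char) (ws : List (List Char)) (x : Char) :
    suffixes (v :: ws) x = (match v with
      | [] => suffixes ws x
      | y :: ys => if x = y then ys :: suffixes ws x else suffixes ws x) := by
  cases v with
  | nil => rfl
  | cons y ys =>
    by_cases h : x = y <;> simp [suffixes, h]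

theorem mem_suffixes_of_mem {x : Char} {xs : List Char} {ws : List (List Char)}
    (h : x :: xs ∈ ws) : xs ∈ suffixes ws x := by
  simp only [suffixes, List.mem_filterMap]
  exact ⟨x :: xs, h, by simp⟩

-- the central trie-shape lemma: what lives at child x after folding inserts over ws
theorem get_foldl_insertC (ws : List (List Char)) (c : TChildren) (x : Char) (d : Int) :
    childGet? (ws.foldl (fun a w => insertC a w d) c) x =
      if suffixes ws x = [] then childGet? c x
      else some ((suffixes ws x).foldl (fun n s => updIns n s (d + 1))
                  ((childGet? c x).getD (.mk d 0 .nil))) := by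
  induction ws generalizing c with
  | nil => simp [suffixes_nil]
  | cons v ws ih =>
    simp only [List.foldl_cons]
    rw [ih, suffixes_cons]
    cases v with
    | nil => simp [insertC]
    | cons y ys =>
      by_cases hxy : x = y
      · subst hxy
        rw [insertC_cons]
        rw [childGet?_childSet]
        split <;> simp_all
      · simp only [if_neg hxy]
        rw [insertC_cons, childGet?_childSet, if_neg hxy]

theorem foldl_updIns (ss : List (List Char)) (c h : Int) (ch : TChildren) (d : Int) :
    ss.foldl (fun n s => updIns n s d) (.mk c h ch) =
      .mk c (h + ss.length) (ss.foldl (fun a s => insertC a s d) ch) := by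
  induction ss generalizing h ch with
  | nil => simp
  | cons s ss ih =>
    simp only [List.foldl_cons]
    rw [show updIns (TNode.mk c h ch) s d = TNode.mk c (h + 1) (insertC ch s d) from rfl, ih]
    simp only [List.length_cons, TNode.mk.injEq]
    refine ⟨trivial, by push_cast; ring, trivial⟩

def buildC (ws : List (List Char)) (d : Int) : TChildren :=
  ws.foldl (fun a w => insertC a w d) .nil

theorem get_buildC (ws : List (List Char)) (x : Char) (d : Int) :
    childGet? (buildC ws d) x =
      if suffixes ws x = [] then none
      else some (.mk d ((suffixes ws x).length) (buildC (suffixes ws x) (d + 1))) := by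
  unfold buildC
  rw [get_foldl_insertC]
  split
  · simp [childGet?]
  · rw [show childGet? TChildren.nil x = none from rfl]
    simp only [Option.getD_none]
    rw [foldl_updIns]
    simp

-- search spec over suffix multisets
def sSpec : List Char → List (List Char) → Int → Int
  | [], _, d => d
  | x :: xs, ws, d =>
      if (suffixes ws x).length = 1 then d + 1 else sSpec xs (suffixes ws x) (d + 1)

theorem searchA_buildC (w : List Char) (ws : List (List Char)) (d h : Int)
    (hmem : w ∈ ws) :
    searchA (.mk d h (buildC ws (d + 1))) w = sSpec w ws d := by
  induction w generalizing ws d h with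
  | nil => rfl
  | cons x xs ih =>
    have hx : xs ∈ suffixes ws x := mem_suffixes_of_mem hmem
    have hne : suffixes ws x ≠ [] := List.ne_nil_of_mem hx
    simp only [searchA, sSpec, get_buildC, if_neg hne]
    by_cases h1 : (suffixes ws x).length = 1
    · simp [h1]
    · have : (((suffixes ws x).length : Int) == 1) = false := by
        simp; omega
      simp only [this, if_neg h1, Bool.false_eq_true, if_false]
      have := ih (suffixes ws x) (d + 1) ((suffixes ws x).length) hx
      simpa using this

-- ===== B-side: max common-prefix length with the other words =====
def lcpNat : List Char → List Char → Nat
  | a :: as, b :: bs => if a = b then 1 + lcpNat as bs else 0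
  | _, _ => 0

def maxL : List Nat → Nat
  | [] => 0
  | a :: l => max a (maxL l)

def maxLcp (w : List Char) (os : List (List Char)) : Nat := maxL (os.map (lcpNat w))

theorem suffixes_cons_nil (ws : List (List Char)) (x : Char) :
    suffixes ([] :: ws) x = suffixes ws x := rfl

theorem suffixes_cons_eq (ys : List Char) (ws : List (List Char)) (x : Char) :
    suffixes ((x :: ys) :: ws) x = ys :: suffixes ws x := by
  simp [suffixes]

theorem suffixes_cons_ne {x y : Char} (h : x ≠ y) (ys : List Char) (ws : List (List Char)) :
    suffixes ((y :: ys) :: ws) x = suffixes ws x := by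
  simp [suffixes, h]

theorem maxLcp_cons' (w v : List Char) (os : List (List Char)) :
    maxLcp w (v :: os) = max (lcpNat w v) (maxLcp w os) := rfl

theorem lcpB_eq (a b : List Char) : lcpB a b = (lcpNat a b : Int) := by
  induction a generalizing b with
  | nil => cases b <;> rfl
  | cons x xs ih =>
    cases b with
    | nil => rfl
    | cons y ys =>
      simp only [lcpB, lcpNat]
      split <;> simp [ih]

theorem maxLcp_cons (x : Char) (xs : List Char) (os : List (List Char)) :
    maxLcp (x :: xs) os =
      if suffixes os x = [] then 0 else 1 + maxLcp xs (suffixes os x) := by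
  induction os with
  | nil => rfl
  | cons v rest ih =>
    cases v with
    | nil =>
      rw [suffixes_cons_nil, maxLcp_cons', show lcpNat (x :: xs) [] = 0 from rfl, ih]
      omega
    | cons y r =>
      by_cases hxy : x = y
      · subst hxy
        rw [suffixes_cons_eq, maxLcp_cons',
            show lcpNat (x :: xs) (x :: r) = 1 + lcpNat xs r from by simp [lcpNat],
            ih, if_neg (List.cons_ne_nil r (suffixes rest x)), maxLcp_cons']
        by_cases hss : suffixes rest x = []
        · rw [if_pos hss]
          have : maxLcp xs (suffixes rest x) = 0 := by rw [hss]; rfl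
          omega
        · rw [if_neg hss]; omega
      · rw [suffixes_cons_ne hxy, maxLcp_cons',
            show lcpNat (x :: xs) (y :: r) = 0 from by simp [lcpNat, hxy], ih]
        omega

theorem suffixes_erase (ws : List (List Char)) (x : Char) (xs : List Char) :
    suffixes (ws.erase (x :: xs)) x = (suffixes ws x).erase xs := by
  induction ws with
  | nil => rfl
  | cons v rest ih =>
    by_cases hv : v = x :: xs
    · subst hv
      rw [List.erase_cons_head, suffixes_cons_eq, List.erase_cons_head]
    · rw [List.erase_cons_tail (by simpa using hv)]
      cases v with
      | nil => rw [suffixes_cons_nil, suffixes_cons_nil, ih]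
      | cons y r =>
        by_cases hxy : x = y
        · subst hxy
          have hr : r ≠ xs := fun h => hv (by rw [h])
          rw [suffixes_cons_eq, suffixes_cons_eq,
              List.erase_cons_tail (by simpa using hr), ih]
        · rw [suffixes_cons_ne hxy, suffixes_cons_ne hxy, ih]

theorem sSpec_formula (w : List Char) (ws : List (List Char)) (d : Int)
    (hmem : w ∈ ws) :
    sSpec w ws d = d + min (w.length : Int) ((maxLcp w (ws.erase w) : Int) + 1) := by
  induction w generalizing ws d with
  | nil =>
    have : min ((0:Nat) : Int) ((maxLcp [] (ws.erase []) : Int) + 1) = 0 := by omega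
    simp only [sSpec, List.length_nil]
    omega
  | cons x xs ih =>
    have hx : xs ∈ suffixes ws x := mem_suffixes_of_mem hmem
    have hss := suffixes_erase ws x xs
    rw [maxLcp_cons, hss]
    by_cases h1 : (suffixes ws x).length = 1
    · have hsx : suffixes ws x = [xs] := by
        rcases List.length_eq_one_iff.mp h1 with ⟨a, ha⟩
        rw [ha] at hx ⊢
        simp at hx; rw [hx]
      rw [hsx]
      rw [show (([xs] : List (List Char)).erase xs) = [] from by simp]
      simp only [sSpec, if_pos h1, List.length_cons]
      push_cast
      omega
    · have hne : (suffixes ws x).erase xs ≠ [] := by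
        have hlen := List.length_erase_of_mem hx
        have hpos := List.length_pos_of_mem hx
        intro hcon
        rw [hcon] at hlen
        simp at hlen
        omega
      rw [if_neg hne]
      simp only [sSpec, if_neg h1]
      rw [ih (suffixes ws x) (d + 1) hx]
      simp only [List.length_cons]
      push_cast
      omega

-- root structure of A's build
theorem foldl_insertA_mk (ws : List String) (a b : Int) (c0 : TChildren) :
    ws.foldl (fun r w => insertA r w.toList 1) (.mk a b c0) =
      .mk a b (ws.foldl (fun cc w => insertC cc w.toList 1) c0) := by
  induction ws generalizing c0 with
  | nil => rfl
  | cons w ws ih => simp only [List.foldl_cons, insertA_mk]; exact ih _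

theorem root_build (words : List String) :
    words.foldl (fun r w => insertA r w.toList 1) (.mk 0 0 .nil) =
      .mk 0 0 (buildC (words.map String.toList) 1) := by
  rw [foldl_insertA_mk]
  unfold buildC
  rw [List.foldl_map]

-- permutation facts
theorem maxL_perm {l1 l2 : List Nat} (h : l1.Perm l2) : maxL l1 = maxL l2 := by
  induction h with
  | nil => rfl
  | cons a _ ih => simp [maxL, ih]
  | swap a b l => simp [maxL]; omega
  | trans _ _ ih1 ih2 => omega

theorem perm_cons_eraseIdx {α : Type} (l : List α) (k : Nat) (h : k < l.length) :
    l.Perm (l[k] :: l.eraseIdx k) := by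
  induction l generalizing k with
  | nil => simp at h
  | cons a l ih =>
    cases k with
    | zero => simp
    | succ k =>
      have hk : k < l.length := by simpa using h
      simp only [List.getElem_cons_succ, List.eraseIdx_cons_succ]
      exact ((ih k hk).cons a).trans (List.Perm.swap _ _ _)

theorem eraseIdx_perm_erase {α : Type} [BEq α] [LawfulBEq α] (l : List α) (k : Nat)
    (h : k < l.length) : (l.eraseIdx k).Perm (l.erase l[k]) := by
  have h1 := perm_cons_eraseIdx l k h
  have hmem : l[k] ∈ l := List.getElem_mem h
  have h2 := List.perm_cons_erase hmem
  exact List.Perm.cons_inv (h1.symm.trans h2)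

-- inner fold of B = max over the other entries
theorem inner_fold_eq (wl : List Char) (i : Int) (es : List (Int × String)) (b : Int)
    (hb : 0 ≤ b) :
    es.foldl (fun best jv =>
        if jv.1 ≠ i then
          (let k := lcpB wl jv.2.toList; if k > best then k else best)
        else best) b =
      max b ((maxL ((es.filter (fun jv => jv.1 ≠ i)).map
        (fun jv => lcpNat wl jv.2.toList)) : Nat) : Int) := by
  induction es generalizing b with
  | nil => simp only [List.foldl_nil, List.filter_nil, List.map_nil]
            ; show b = max b ((maxL [] : Nat) : Int)
            ; have : maxL [] = 0 := rfl
            ; omega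
  | cons e es ih =>
    simp only [List.foldl_cons]
    by_cases he : e.1 ≠ i
    · rw [if_pos he]
      have hstep : (let k := lcpB wl e.2.toList; if k > b then k else b) =
          max b (lcpB wl e.2.toList) := by
        simp only []
        split <;> omega
      rw [hstep, lcpB_eq]
      have hge : (0:Int) ≤ max b ((lcpNat wl e.2.toList : Nat) : Int) := by positivity
      rw [ih _ hge, List.filter_cons_of_pos (by simpa using he)]
      simp only [List.map_cons]
      rw [show maxL (lcpNat wl e.2.toList :: (es.filter (fun jv => jv.1 ≠ i)).map
            (fun jv => lcpNat wl jv.2.toList)) =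
          max (lcpNat wl e.2.toList) (maxL ((es.filter (fun jv => jv.1 ≠ i)).map
            (fun jv => lcpNat wl jv.2.toList))) from rfl]
      push_cast
      omega
    · rw [if_neg he, ih _ hb, List.filter_cons_of_neg (by simpa using he)]

theorem filter_enumerate_ne (l : List String) (s : Int) (k : Nat) (hk : k < l.length) :
    ((PySem.List.enumerate l s).filter (fun jv => jv.1 ≠ s + (k : Int))).map (·.2) =
      l.eraseIdx k := by
  induction l generalizing s k with
  | nil => simp at hk
  | cons a l ih =>
    rw [PySem.List.enumerate_cons]
    cases k with
    | zero =>
      rw [List.filter_cons_of_neg (by simp)]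
      have hall : (PySem.List.enumerate l (s + 1)).filter
          (fun jv => jv.1 ≠ s + ((0:Nat):Int)) = PySem.List.enumerate l (s + 1) := by
        apply List.filter_eq_self.mpr
        intro p hp
        rcases (PySem.List.mem_enumerate_iff _ _ _).mp hp with ⟨j, hj, rfl⟩
        simp only [decide_eq_true_eq]
        omega

      rw [hall, PySem.List.map_snd_enumerate]
      simp
    | succ k =>
      have hne : (s ≠ s + ((k + 1 : Nat) : Int)) := by push_cast; omega
      rw [List.filter_cons_of_pos (by simpa using hne)]
      have hk' : k < l.length := by simp at hk; omega
      simp only [List.map_cons, List.eraseIdx_cons_succ]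
      congr 1
      rw [← ih (s + 1) k hk']
      congr 2
      funext jv
      have harith : s + ((k + 1 : Nat) : Int) = s + 1 + (k : Int) := by push_cast; ring
      rw [harith]

-- per-word value of B's inner loop
theorem alt_term_eq (words : List String) (k : Nat) (hk : k < words.length) :
    ((PySem.List.enumerate words).foldl (fun best jv =>
        if jv.1 ≠ (0 : Int) + (k : Int) then
          (let kk := lcpB words[k].toList jv.2.toList; if kk > best then kk else best)
        else best) 0) =
      ((maxLcp words[k].toList ((words.map String.toList).erase words[k].toList) : Nat) : Int) := by
  rw [inner_fold_eq _ _ _ _ le_rfl]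
  rw [show ∀ m : Int, max (0 : Int) m = if m ≥ 0 then m else 0 from fun m => by omega]
  rw [if_pos (by positivity)]
  congr 1
  have hfe := filter_enumerate_ne words 0 k hk
  have hmm : ((PySem.List.enumerate words 0).filter (fun jv => jv.1 ≠ (0:Int) + (k:Int))).map
      (fun jv => lcpNat words[k].toList jv.2.toList) =
      (((PySem.List.enumerate words 0).filter
        (fun jv => jv.1 ≠ (0:Int) + (k:Int))).map (·.2)).map
      (fun v => lcpNat words[k].toList v.toList) := by
    rw [List.map_map]; rfl
  rw [show PySem.List.enumerate words = PySem.List.enumerate words 0 from rfl] at *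
  rw [hmm, hfe]
  have hkk : k < (words.map String.toList).length := by simpa using hk
  have h3 : (words.map String.toList)[k] = words[k].toList := by simp
  have h2 := eraseIdx_perm_erase (words.map String.toList) k hkk
  rw [h3] at h2
  have h4 := h2.map (lcpNat words[k].toList)
  have h5 : ((words.map String.toList).eraseIdx k).map (lcpNat words[k].toList) =
      (words.eraseIdx k).map (fun v => lcpNat words[k].toList v.toList) := by
    rw [List.eraseIdx_map, List.map_map]; rfl
  rw [h5] at h4
  unfold maxLcp
  exact maxL_perm h4

-- ===== VERDICT (by name: the statement is the Claim_ definition above) =====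
theorem per_word_eq (words : List String) (k : Nat) (hk : k < words.length) :
    searchA (TNode.mk 0 0 (buildC (words.map String.toList) 1)) words[k].toList =
      min (PySem.Str.len words[k])
        (((maxLcp words[k].toList
            ((words.map String.toList).erase words[k].toList) : Nat) : Int) + 1) := by
  have hmem : words[k].toList ∈ words.map String.toList :=
    List.mem_map_of_mem (List.getElem_mem hk)
  have h1 := searchA_buildC words[k].toList (words.map String.toList) 0 0 hmem
  rw [show (0:Int) + 1 = 1 from rfl] at h1
  rw [h1, sSpec_formula _ _ _ hmem, PySem.Str.len_eq]
  omega

theorem solution_spec : Claim_equal_solution := by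
  intro words _
  unfold Spec_solution solution solution_alt
  rw [root_build]
  show words.foldl (fun a w =>
      a + searchA (TNode.mk 0 0 (buildC (words.map String.toList) 1)) w.toList) 0 =
    (PySem.List.enumerate words).foldl (fun total iw =>
      total + min (PySem.Str.len iw.2)
        ((PySem.List.enumerate words).foldl (fun best jv =>
          if jv.1 ≠ iw.1 then
            (let k := lcpB iw.2.toList jv.2.toList; if k > best then k else best)
          else best) 0 + 1)) 0
  rw [PySem.List.foldl_add, PySem.List.foldl_add]
  have hmap : (PySem.List.enumerate words).map (fun iw =>
      min (PySem.Str.len iw.2)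
        ((PySem.List.enumerate words).foldl (fun best jv =>
          if jv.1 ≠ iw.1 then
            (let k := lcpB iw.2.toList jv.2.toList; if k > best then k else best)
          else best) 0 + 1)) =
      words.map (fun w =>
        searchA (TNode.mk 0 0 (buildC (words.map String.toList) 1)) w.toList) := by
    apply List.ext_getElem
    · simp [PySem.List.length_enumerate]
    · intro k hk1 hk2
      have hk : k < words.length := by
        simpa [PySem.List.length_enumerate] using hk1
      rw [List.getElem_map, List.getElem_map, PySem.List.getElem_enumerate]
      show min (PySem.Str.len words[k])
          ((PySem.List.enumerate words).foldl (fun best jv =>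
            if jv.1 ≠ (0 : Int) + (k : Int) then
              (let kk := lcpB words[k].toList jv.2.toList; if kk > best then kk else best)
            else best) 0 + 1) = _
      rw [alt_term_eq words k hk, per_word_eq words k hk]
  rw [hmap]
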